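-- pv_equiv track=rewrite | github.com/Stak646/Keenetic-RDCT | rdct/collectors/device_info.py | parse_cpuinfo_text
-- ===== SOURCE A (Python) =====
-- from typing import Any, Dict, List
--
-- def parse_cpuinfo_text(cpuinfo: str) -> Dict[str, object]:
--     """Best-effort CPU info for embedded Linux."""
--     cpu: Dict[str, object] = {"model": None, "cores": None, "features": None}
--     if not cpuinfo:
--         return cpu
--     lines = cpuinfo.splitlines()
--
--     cores = 0
--     for ln in lines:
--         if ln.lower().startswith("processor") and ":" in ln:
--             cores += 1
--     cpu["cores"] = cores or None
--
--     model = None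
--     for key in ("model name", "hardware", "system type", "cpu model"):
--         for ln in lines:
--             if ln.lower().startswith(key) and ":" in ln:
--                 model = ln.split(":", 1)[1].strip()
--                 break
--         if model:
--             break
--     cpu["model"] = model
--
--     feats = None
--     for ln in lines:
--         if ln.lower().startswith("features") and ":" in ln:
--             feats = ln.split(":", 1)[1].strip()
--             break
--     cpu["features"] = feats
--
--     return cpu
-- ===== SOURCE B (Python) =====
-- def parse_cpuinfo_text(cpuinfo: str):
--     """Best-effort CPU info for embedded Linux (single pass over the lines)."""
--     cores = 0
--     model_name = hardware = system_type = cpu_model = features = None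
--     for ln in cpuinfo.splitlines():
--         if ":" not in ln:
--             continue
--         low = ln.lower()
--         if low.startswith("processor"):
--             cores += 1
--         val = ln.split(":", 1)[1].strip()
--         if model_name is None and low.startswith("model name"):
--             model_name = val
--         if hardware is None and low.startswith("hardware"):
--             hardware = val
--         if system_type is None and low.startswith("system type"):
--             system_type = val
--         if cpu_model is None and low.startswith("cpu model"):
--             cpu_model = val
--         if features is None and low.startswith("features"):
--             features = val
--     model = None
--     for v in (model_name, hardware, system_type, cpu_model):
--         if v:
--             model = v
--             break
--     return {"model": model, "cores": cores or None, "features": features}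
-- ===== Notes on version B (the rewrite author's own statement) =====
-- stated objective: simpler
-- what changed: A scans the split lines up to six times (one pass for cores, one per model-priority key, one for features); B makes a single pass that counts processor lines and records the first value seen for each of the five keys, then picks the first truthy recorded model value.
-- intended difference: On inputs where some model-priority key has a matching line but every such key's first matching line carries only whitespace after its colon, A returns an empty-string model (left over from its assign-then-test loop) while B returns model None, the intended value when no model is found. — e.g. on parse_cpuinfo_text("hardware:"): A returns [("model", some ""), ("cores", none), ("features", none)], B returns [("model", none), ("cores", none), ("features", none)]
import Mathlib
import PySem

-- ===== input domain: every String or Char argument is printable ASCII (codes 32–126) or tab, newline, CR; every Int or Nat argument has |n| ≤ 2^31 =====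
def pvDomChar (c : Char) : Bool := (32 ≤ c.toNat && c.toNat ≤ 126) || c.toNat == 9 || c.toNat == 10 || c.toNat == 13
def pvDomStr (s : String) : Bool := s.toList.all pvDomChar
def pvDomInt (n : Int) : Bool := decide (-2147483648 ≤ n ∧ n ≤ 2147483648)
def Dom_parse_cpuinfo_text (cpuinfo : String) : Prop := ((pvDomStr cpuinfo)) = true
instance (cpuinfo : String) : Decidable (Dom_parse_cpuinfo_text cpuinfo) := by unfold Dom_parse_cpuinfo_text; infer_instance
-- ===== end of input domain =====

-- B replaces A's six separate scans of the lines by one pass keeping a slot per key (objective: simpler);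
-- where every matching model line has a blank value, A returns an empty-string model and B returns model None (see D_ below).

-- shared line-level helper: ln.split(":", 1)[1].strip()  (exact whenever ":" occurs in ln, the only place both Pythons use it)
def pvColonVal (ln : String) : String :=
  PySem.Str.strip (((PySem.Str.splitMax? ln ":" 1).getD [ln]).getD 1 "")

-- ===== PORT A =====
-- Python truthiness of an optional string
def pvTruthy : Option String → Bool
  | none => false
  | some s => !(s == "")

-- 'cores = 0; for ln in lines: if …: cores += 1'
def pvCountCores (lines : List String) (cores : Int) : Int :=
  match lines with
  | [] => cores
  | ln :: rest =>
      pvCountCores rest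
        (if PySem.Str.startswith (PySem.Str.lower ln) "processor" && PySem.Str.isIn ":" ln then cores + 1 else cores)

-- the inner 'for ln in lines: if …: model = …; break' loop, threading the current model
def pvFirstMatchA (key : String) (lines : List String) (model : Option String) : Option String :=
  match lines with
  | [] => model
  | ln :: rest =>
      if PySem.Str.startswith (PySem.Str.lower ln) key && PySem.Str.isIn ":" ln then
        some (pvColonVal ln)
      else pvFirstMatchA key rest model

-- the outer 'for key in (…): …; if model: break' loop
def pvModelLoopA (lines : List String) (keys : List String) (model : Option String) : Option String :=
  match keys with
  | [] => model
  | k :: ks =>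
      let m := pvFirstMatchA k lines model
      if pvTruthy m then m else pvModelLoopA lines ks m

def parse_cpuinfo_text (cpuinfo : String) : List (String × Option String) :=
  let cpu : PySem.Dict String (Option String) := PySem.Dict.ofList [("model", none), ("cores", none), ("features", none)]
  if cpuinfo == "" then cpu.items
  else
    let lines := PySem.Str.splitlines cpuinfo
    let cores := pvCountCores lines 0
    let cpu := PySem.Dict.insert cpu "cores" (if cores == 0 then none else some (PySem.Int.toStr cores))
    let model := pvModelLoopA lines ["model name", "hardware", "system type", "cpu model"] none
    let cpu := PySem.Dict.insert cpu "model" model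
    let feats := pvFirstMatchA "features" lines none
    (PySem.Dict.insert cpu "features" feats).items

-- ===== PORT B =====
-- the single 'for ln in …' pass of Source B: state = (cores, model_name, hardware, system_type, cpu_model, features)
def pvScanB (lines : List String) (cores : Int) (mn ha st cm fe : Option String) :
    Int × Option String × Option String × Option String × Option String × Option String :=
  match lines with
  | [] => (cores, mn, ha, st, cm, fe)
  | ln :: rest =>
      if PySem.Str.isIn ":" ln then
        let low := PySem.Str.lower ln
        let cores' := if PySem.Str.startswith low "processor" then cores + 1 else cores
        let v := pvColonVal ln
        let mn' := if mn.isNone && PySem.Str.startswith low "model name" then some v else mn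
        let ha' := if ha.isNone && PySem.Str.startswith low "hardware" then some v else ha
        let st' := if st.isNone && PySem.Str.startswith low "system type" then some v else st
        let cm' := if cm.isNone && PySem.Str.startswith low "cpu model" then some v else cm
        let fe' := if fe.isNone && PySem.Str.startswith low "features" then some v else fe
        pvScanB rest cores' mn' ha' st' cm' fe'
      else pvScanB rest cores mn ha st cm fe

-- 'model = None; for v in (…): if v: model = v; break'
def pvResolveB (vs : List (Option String)) : Option String :=
  match vs with
  | [] => none
  | v :: rest => if pvTruthy v then v else pvResolveB rest

def parse_cpuinfo_text_alt (cpuinfo : String) : List (String × Option String) :=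
  let r := pvScanB (PySem.Str.splitlines cpuinfo) 0 none none none none none
  let model := pvResolveB [r.2.1, r.2.2.1, r.2.2.2.1, r.2.2.2.2.1]
  [("model", model),
   ("cores", if r.1 == 0 then none else some (PySem.Int.toStr r.1)),
   ("features", r.2.2.2.2.2)]

-- ===== PRECONDITION & SPEC =====
-- D_ vocabulary, stated on the input text only: a line that carries one of the model keys,
-- and a line whose text after the first ':' is all whitespace (i.e. its value is blank)
def pvKeyLine (key ln : String) : Bool :=
  key.toList.isPrefixOf (ln.toList.map PySem.Chars.lowerChar) && decide (':' ∈ ln.toList)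

def pvBlankTail (ln : String) : Bool :=
  ((ln.toList.dropWhile (fun c => c ≠ ':')).tail).all PySem.Chars.isspace

-- On inputs where some model-priority key ("model name"/"hardware"/"system type"/"cpu model") has a
-- matching line but every such key's first matching line carries only whitespace after its colon,
-- A returns an empty-string model (left over from its assign-then-test loop) while B returns model
-- None, the intended value when no model is found.
def D_parse_cpuinfo_text (cpuinfo : String) : Prop :=
  let lines := PySem.Str.splitlines cpuinfo
  let keys := ["model name", "hardware", "system type", "cpu model"]
  (∃ k ∈ keys, (lines.find? (pvKeyLine k)).isSome = true) ∧
  (∀ k ∈ keys, (lines.find? (pvKeyLine k)).all pvBlankTail = true)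
instance (cpuinfo : String) : Decidable (D_parse_cpuinfo_text cpuinfo) := by unfold D_parse_cpuinfo_text; infer_instance

def Spec_parse_cpuinfo_text (cpuinfo : String) (out : List (String × Option String)) : Prop :=
  ¬ D_parse_cpuinfo_text cpuinfo → out = parse_cpuinfo_text_alt cpuinfo
instance (cpuinfo : String) (out : List (String × Option String)) : Decidable (Spec_parse_cpuinfo_text cpuinfo out) := by unfold Spec_parse_cpuinfo_text; infer_instance

def pvDiffWitness_parse_cpuinfo_text : String := "hardware:"
def pvDiffWitnessOut_parse_cpuinfo_text : (List (String × Option String)) × (List (String × Option String)) :=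
  ([("model", some ""), ("cores", none), ("features", none)],
   [("model", none), ("cores", none), ("features", none)])

-- ===== CLAIM =====
def Claim_unchanged_parse_cpuinfo_text : Prop := ∀ (cpuinfo : String), Dom_parse_cpuinfo_text cpuinfo → Spec_parse_cpuinfo_text cpuinfo (parse_cpuinfo_text cpuinfo)
def Claim_changed_parse_cpuinfo_text : Prop := Dom_parse_cpuinfo_text (pvDiffWitness_parse_cpuinfo_text) ∧ D_parse_cpuinfo_text (pvDiffWitness_parse_cpuinfo_text) ∧ parse_cpuinfo_text (pvDiffWitness_parse_cpuinfo_text) = pvDiffWitnessOut_parse_cpuinfo_text.1 ∧ parse_cpuinfo_text_alt (pvDiffWitness_parse_cpuinfo_text) = pvDiffWitnessOut_parse_cpuinfo_text.2 ∧ pvDiffWitnessOut_parse_cpuinfo_text.1 ≠ pvDiffWitnessOut_parse_cpuinfo_text.2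
def Claim_exact_parse_cpuinfo_text : Prop := ∀ (cpuinfo : String), Dom_parse_cpuinfo_text cpuinfo → D_parse_cpuinfo_text cpuinfo → parse_cpuinfo_text cpuinfo ≠ parse_cpuinfo_text_alt cpuinfo

-- ===== LEMMAS AND PROOFS =====

-- pvKeyLine states A's line test as a shape on the characters; these bridge it to the ports' primitives
theorem pvMem_iff_infix (a : Char) (l : List Char) : ([a] <:+: l) ↔ a ∈ l := by
  constructor
  · intro h; exact h.subset (by simp)
  · intro h
    obtain ⟨u, t, rfl⟩ := List.append_of_mem h
    exact ⟨u, t, by simp⟩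

theorem pvKeyLine_eq (key ln : String) :
    pvKeyLine key ln = (PySem.Str.startswith (PySem.Str.lower ln) key && PySem.Str.isIn ":" ln) := by
  unfold pvKeyLine
  have h1 : key.toList.isPrefixOf (ln.toList.map PySem.Chars.lowerChar) =
      PySem.Str.startswith (PySem.Str.lower ln) key := by
    rw [Bool.eq_iff_iff, List.isPrefixOf_iff_prefix, PySem.Str.startswith,
      PySem.Chars.startswith_iff, PySem.Str.toList_lower]
    simp [PySem.Chars.lower]
  have h2 : decide (':' ∈ ln.toList) = PySem.Str.isIn ":" ln := by
    rw [Bool.eq_iff_iff, decide_eq_true_iff, PySem.Str.isIn, PySem.Chars.isIn_iff_infix]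
    have h3 : (":" : String).toList = [':'] := rfl
    rw [h3]
    exact (pvMem_iff_infix ':' ln.toList).symm
  rw [h1, h2]

-- proof-side abbreviation: the first value A (and B) record for one key
def pvVal (lines : List String) (k : String) : Option String :=
  (lines.find? (pvKeyLine k)).map pvColonVal

-- ----- the splitOnMax characterisation: value after the first ':' -----

theorem pvGo_zero (fuel : Nat) (rest cur : List Char) (acc : List (List Char)) :
    PySem.Chars.splitOnMax.go [':'] fuel 0 rest cur acc = ((cur.reverse ++ rest) :: acc).reverse := by
  match fuel, rest with
  | 0, rest => rw [PySem.Chars.splitOnMax.go]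
  | f+1, [] => rw [PySem.Chars.splitOnMax.go] <;> simp
  | f+1, c :: rest => rw [PySem.Chars.splitOnMax.go] <;> simp

theorem pvGo_one (l : List Char) : ∀ (fuel : Nat) (cur : List Char) (acc : List (List Char)),
    l.length < fuel →
    PySem.Chars.splitOnMax.go [':'] fuel 1 l cur acc =
      if ':' ∈ l then
        acc.reverse ++ [cur.reverse ++ l.takeWhile (fun c => c ≠ ':'), (l.dropWhile (fun c => c ≠ ':')).tail]
      else acc.reverse ++ [cur.reverse ++ l] := by
  induction l with
  | nil =>
    intro fuel cur acc hf
    obtain ⟨f, rfl⟩ : ∃ f, fuel = f + 1 := ⟨fuel - 1, by omega⟩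
    rw [PySem.Chars.splitOnMax.go] <;> simp
  | cons c rest ih =>
    intro fuel cur acc hf
    obtain ⟨f, rfl⟩ : ∃ f, fuel = f + 1 := ⟨fuel - 1, by omega⟩
    rw [PySem.Chars.splitOnMax.go]
    by_cases hc : c = ':'
    · subst hc
      simp only [List.isPrefixOf, BEq.rfl, Bool.true_and, List.isPrefixOf_nil_left, if_true]
      have : ¬ (f + 1 = 0) := by omega
      simp only [this, if_false, List.length_cons, List.drop_succ_cons, List.drop_zero]
      rw [pvGo_zero]
      simp [List.takeWhile, List.dropWhile]
    · have hpre : List.isPrefixOf [':'] (c :: rest) = false := by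
        simp only [List.isPrefixOf, List.isPrefixOf_nil_left, Bool.and_true]
        simp [beq_iff_eq, Ne.symm hc]
      have : ¬ (f + 1 = 0) := by omega
      simp only [this, if_false, hpre, Bool.false_eq_true]
      rw [if_neg (by simp)]
      rw [ih f (c :: cur) acc (by simpa using Nat.lt_of_succ_lt_succ hf)]
      have hmem : (':' ∈ c :: rest) = (':' ∈ rest) := by simp [List.mem_cons, Ne.symm hc]
      by_cases hm : ':' ∈ rest
      · simp [hm, hmem, List.takeWhile_cons, List.dropWhile_cons, hc]
      · simp [hm, hmem, List.takeWhile_cons, List.dropWhile_cons, hc]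

-- Chars.strip is empty exactly when every character is whitespace
theorem pvStrip_nil (l : List Char) :
    (PySem.Chars.strip l = [] ↔ ∀ c ∈ l, PySem.Chars.isspace c = true) := by
  unfold PySem.Chars.strip PySem.Chars.rstrip PySem.Chars.lstrip
  rw [List.reverse_eq_nil_iff, List.dropWhile_eq_nil_iff]
  constructor
  · intro h
    have hnil : List.dropWhile PySem.Chars.isspace l = [] := by
      by_cases hN : List.dropWhile PySem.Chars.isspace l = []
      · exact hN
      · exfalso
        have hhead := List.head_dropWhile_not (p := PySem.Chars.isspace) (l := l) hN
        have hmem : (List.dropWhile PySem.Chars.isspace l).head hN ∈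
            List.dropWhile PySem.Chars.isspace l := List.head_mem hN
        have htrue := h _ (List.mem_reverse.mpr hmem)
        rw [htrue] at hhead
        simp at hhead
    exact List.dropWhile_eq_nil_iff.mp hnil
  · intro h x hx
    have hnil : List.dropWhile PySem.Chars.isspace l = [] := List.dropWhile_eq_nil_iff.mpr h
    rw [hnil] at hx
    simp at hx

-- for a line containing ':', A's stripped value is "" iff the tail after the first ':' is all whitespace
theorem pvColonVal_empty (ln : String) (h : PySem.Str.isIn ":" ln = true) :
    (pvColonVal ln = "" ↔ pvBlankTail ln = true) := by
  have hmem : ':' ∈ ln.toList := by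
    have := (PySem.Str.isIn_iff_infix ":" ln).mp h
    have h2 : (":" : String).toList = [':'] := rfl
    rw [h2] at this
    exact this.subset (by simp)
  -- compute the split
  have hsplit : PySem.Chars.splitMax? ln.toList (":" : String).toList 1 =
      some [ln.toList.takeWhile (fun c => c ≠ ':'), (ln.toList.dropWhile (fun c => c ≠ ':')).tail] := by
    show PySem.Chars.splitMax? ln.toList [':'] 1 = _
    unfold PySem.Chars.splitMax? PySem.Chars.splitOnMax
    rw [if_neg (by simp), if_neg (by omega)]
    simp only [Int.toNat_one]
    rw [pvGo_one ln.toList (ln.toList.length + 1) [] [] (by omega)]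
    simp [hmem]
  have hmap := PySem.Str.splitMax?_map ln ":" 1
  rw [hsplit] at hmap
  -- extract the two String pieces
  cases hopt : PySem.Str.splitMax? ln ":" 1 with
  | none => rw [hopt] at hmap; simp at hmap
  | some xs =>
    rw [hopt] at hmap
    simp only [Option.map_some, Option.some.injEq] at hmap
    have hlen : xs.length = 2 := by
      have := congrArg List.length hmap; simpa using this
    obtain ⟨a, b, rfl⟩ := List.length_eq_two.mp hlen
    · 
      have hb : b.toList = (ln.toList.dropWhile (fun c => c ≠ ':')).tail := by
        have := congrArg (fun l => l.getLast?) hmap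
        simpa using this
      have : pvColonVal ln = PySem.Str.strip b := by
        unfold pvColonVal
        rw [hopt]
        rfl
      rw [this]
      unfold pvBlankTail
      rw [← hb]
      constructor
      · intro he
        have : (PySem.Str.strip b).toList = [] := by rw [he]; rfl
        rw [PySem.Str.toList_strip] at this
        have := (pvStrip_nil b.toList).mp this
        exact List.all_eq_true.mpr (fun c hc => this c hc)
      · intro hall
        have : PySem.Chars.strip b.toList = [] :=
          (pvStrip_nil b.toList).mpr (fun c hc => List.all_eq_true.mp hall c hc)
        have h2 : (PySem.Str.strip b).toList = ([] : List Char) := by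
          rw [PySem.Str.toList_strip]; exact this
        exact String.toList_inj.mp h2

-- ----- bridging A's inner loop / B's scan to pvVal -----

theorem pvFirstMatchA_find (key : String) (lines : List String) (model : Option String) :
    pvFirstMatchA key lines model = ((lines.find? (pvKeyLine key)).map pvColonVal).elim model some := by
  induction lines with
  | nil => rfl
  | cons ln rest ih =>
    simp only [pvFirstMatchA, List.find?]
    by_cases h : pvKeyLine key ln = true
    · rw [if_pos (by rw [← pvKeyLine_eq]; exact h), h]; rfl
    · rw [if_neg (by rw [← pvKeyLine_eq]; exact h), Bool.not_eq_true] at *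
      rw [h]
      exact ih

theorem pvFirstMatchA_val (key : String) (lines : List String) :
    pvFirstMatchA key lines none = pvVal lines key := by
  rw [pvFirstMatchA_find]
  unfold pvVal
  cases (lines.find? (pvKeyLine key)).map pvColonVal <;> rfl

theorem pvScanB_cores (lines : List String) :
    ∀ cores mn ha st cm fe, (pvScanB lines cores mn ha st cm fe).1 = pvCountCores lines cores := by
  induction lines with
  | nil => intros; rfl
  | cons ln rest ih =>
    intro cores mn ha st cm fe
    simp only [pvScanB, pvCountCores]
    cases hc : PySem.Str.isIn ":" ln <;>
      cases hp : PySem.Str.startswith (PySem.Str.lower ln) "processor" <;>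
        simp_all

theorem pvScanB_mn (lines : List String) :
    ∀ cores mn ha st cm fe, (pvScanB lines cores mn ha st cm fe).2.1 =
      Option.elim mn (pvFirstMatchA "model name" lines none) some := by
  induction lines with
  | nil => intro _ mn _ _ _ _; cases mn <;> rfl
  | cons ln rest ih =>
    intro cores mn ha st cm fe
    simp only [pvScanB, pvFirstMatchA]
    cases mn <;> cases hc : PySem.Str.isIn ":" ln <;>
      cases hk : PySem.Str.startswith (PySem.Str.lower ln) "model name" <;>
        simp_all

theorem pvScanB_ha (lines : List String) :
    ∀ cores mn ha st cm fe, (pvScanB lines cores mn ha st cm fe).2.2.1 =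
      Option.elim ha (pvFirstMatchA "hardware" lines none) some := by
  induction lines with
  | nil => intro _ _ ha _ _ _; cases ha <;> rfl
  | cons ln rest ih =>
    intro cores mn ha st cm fe
    simp only [pvScanB, pvFirstMatchA]
    cases ha <;> cases hc : PySem.Str.isIn ":" ln <;>
      cases hk : PySem.Str.startswith (PySem.Str.lower ln) "hardware" <;>
        simp_all

theorem pvScanB_st (lines : List String) :
    ∀ cores mn ha st cm fe, (pvScanB lines cores mn ha st cm fe).2.2.2.1 =
      Option.elim st (pvFirstMatchA "system type" lines none) some := by
  induction lines with
  | nil => intro _ _ _ st _ _; cases st <;> rfl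
  | cons ln rest ih =>
    intro cores mn ha st cm fe
    simp only [pvScanB, pvFirstMatchA]
    cases st <;> cases hc : PySem.Str.isIn ":" ln <;>
      cases hk : PySem.Str.startswith (PySem.Str.lower ln) "system type" <;>
        simp_all

theorem pvScanB_cm (lines : List String) :
    ∀ cores mn ha st cm fe, (pvScanB lines cores mn ha st cm fe).2.2.2.2.1 =
      Option.elim cm (pvFirstMatchA "cpu model" lines none) some := by
  induction lines with
  | nil => intro _ _ _ _ cm _; cases cm <;> rfl
  | cons ln rest ih =>
    intro cores mn ha st cm fe
    simp only [pvScanB, pvFirstMatchA]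
    cases cm <;> cases hc : PySem.Str.isIn ":" ln <;>
      cases hk : PySem.Str.startswith (PySem.Str.lower ln) "cpu model" <;>
        simp_all

theorem pvScanB_fe (lines : List String) :
    ∀ cores mn ha st cm fe, (pvScanB lines cores mn ha st cm fe).2.2.2.2.2 =
      Option.elim fe (pvFirstMatchA "features" lines none) some := by
  induction lines with
  | nil => intro _ _ _ _ _ fe; cases fe <;> rfl
  | cons ln rest ih =>
    intro cores mn ha st cm fe
    simp only [pvScanB, pvFirstMatchA]
    cases fe <;> cases hc : PySem.Str.isIn ":" ln <;>
      cases hk : PySem.Str.startswith (PySem.Str.lower ln) "features" <;>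
        simp_all

theorem pvFirstMatchA_init (key : String) (lines : List String) (model : Option String) :
    pvFirstMatchA key lines model = Option.elim (pvFirstMatchA key lines none) model some := by
  induction lines with
  | nil => rfl
  | cons ln rest ih =>
    simp only [pvFirstMatchA]
    by_cases h : (PySem.Str.startswith (PySem.Str.lower ln) key && PySem.Str.isIn ":" ln) = true
    · rw [if_pos h, if_pos h]; rfl
    · rw [if_neg h, if_neg h]; exact ih

-- ----- A's model loop vs B's resolve, in terms of pvVal -----

theorem pvModel_truthy (lines : List String) :
    ∀ (keys : List String) (model : Option String), (model = none ∨ model = some "") →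
      (∃ v ∈ keys.map (pvVal lines), pvTruthy v = true) →
      pvModelLoopA lines keys model = pvResolveB (keys.map (pvVal lines)) := by
  intro keys
  induction keys with
  | nil => intro model _ hex; simp at hex
  | cons k ks ih =>
    intro model hm hex
    simp only [pvModelLoopA, List.map, pvResolveB]
    rw [pvFirstMatchA_init, pvFirstMatchA_val]
    cases h : pvVal lines k with
    | none =>
      have hex' : ∃ v ∈ ks.map (pvVal lines), pvTruthy v = true := by
        rcases hex with ⟨v, hv, htv⟩
        simp only [List.map, List.mem_cons] at hv
        rcases hv with rfl | hv
        · rw [h] at htv; simp [pvTruthy] at htv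
        · exact ⟨v, hv, htv⟩
      rcases hm with rfl | rfl
      · simp only [Option.elim_none, Option.elim_some]
        rw [show pvTruthy none = false from rfl]
        simp only [Bool.false_eq_true, if_false]
        exact ih none (Or.inl rfl) hex'
      · simp only [Option.elim_none, Option.elim_some]
        rw [show pvTruthy (some "") = false from rfl]
        simp only [Bool.false_eq_true, if_false]
        exact ih (some "") (Or.inr rfl) hex'
    | some v =>
      by_cases hv : v = ""
      · subst hv
        simp only [Option.elim_none, Option.elim_some]
        rw [show pvTruthy (some "") = false from rfl]
        simp only [Bool.false_eq_true, if_false]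
        have hex' : ∃ w ∈ ks.map (pvVal lines), pvTruthy w = true := by
          rcases hex with ⟨w, hw, htw⟩
          simp only [List.map, List.mem_cons] at hw
          rcases hw with rfl | hw
          · rw [h] at htw; simp [pvTruthy] at htw
          · exact ⟨w, hw, htw⟩
        exact ih (some "") (Or.inr rfl) hex'
      · simp [Option.elim_none, Option.elim_some, pvTruthy, hv]

theorem pvModel_allnone (lines : List String) :
    ∀ (keys : List String) (model : Option String),
      (∀ v ∈ keys.map (pvVal lines), v = none) →
      pvModelLoopA lines keys model = model := by
  intro keys
  induction keys with
  | nil => intro model _; rfl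
  | cons k ks ih =>
    intro model hall
    simp only [pvModelLoopA]
    rw [pvFirstMatchA_init, pvFirstMatchA_val]
    have hk : pvVal lines k = none := hall _ (by simp)
    rw [hk]
    cases model with
    | none => exact ih none (fun v hv => hall v (by simp [hv]))
    | some s =>
      simp only [Option.elim_none, Option.elim_some]
      by_cases hs : pvTruthy (some s) = true
      · rw [if_pos hs]
      · rw [if_neg hs]; exact ih (some s) (fun v hv => hall v (by simp [hv]))

theorem pvResolve_none (vs : List (Option String)) :
    (∀ v ∈ vs, v = none ∨ v = some "") → pvResolveB vs = none := by
  induction vs with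
  | nil => intro _; rfl
  | cons v rest ih =>
    intro hall
    have hv := hall v (by simp)
    have ht : pvTruthy v = false := by rcases hv with rfl | rfl <;> rfl
    simp only [pvResolveB, ht, Bool.false_eq_true, if_false]
    exact ih (fun w hw => hall w (by simp [hw]))

theorem pvModel_pres (lines : List String) :
    ∀ (keys : List String),
      (∀ v ∈ keys.map (pvVal lines), v = none ∨ v = some "") →
      pvModelLoopA lines keys (some "") = some "" := by
  intro keys
  induction keys with
  | nil => intro _; rfl
  | cons k ks ih =>
    intro hall
    simp only [pvModelLoopA]
    rw [pvFirstMatchA_init, pvFirstMatchA_val]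
    have hk : pvVal lines k = none ∨ pvVal lines k = some "" := hall _ (by simp)
    have hrest : ∀ v ∈ ks.map (pvVal lines), v = none ∨ v = some "" :=
      fun v hv => hall v (by simp [hv])
    rcases hk with hk | hk <;> rw [hk] <;>
      simpa [Option.elim_none, Option.elim_some, pvTruthy] using ih hrest

theorem pvModel_empty (lines : List String) :
    ∀ (keys : List String) (model : Option String), (model = none ∨ model = some "") →
      (∃ v ∈ keys.map (pvVal lines), v ≠ none) →
      (∀ v ∈ keys.map (pvVal lines), v = none ∨ v = some "") →
      pvModelLoopA lines keys model = some "" := by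
  intro keys
  induction keys with
  | nil => intro _ _ hex _; simp at hex
  | cons k ks ih =>
    intro model hm hex hall
    simp only [pvModelLoopA]
    rw [pvFirstMatchA_init, pvFirstMatchA_val]
    have hrest : ∀ v ∈ ks.map (pvVal lines), v = none ∨ v = some "" :=
      fun v hv => hall v (by simp [hv])
    have hk : pvVal lines k = none ∨ pvVal lines k = some "" := hall _ (by simp)
    rcases hk with hk | hk
    · rw [hk]
      have hex' : ∃ v ∈ ks.map (pvVal lines), v ≠ none := by
        rcases hex with ⟨v, hv, hnv⟩
        simp only [List.map, List.mem_cons] at hv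
        rcases hv with rfl | hv
        · rw [hk] at hnv; simp at hnv
        · exact ⟨v, hv, hnv⟩
      rcases hm with rfl | rfl
      · simp only [Option.elim_none, Option.elim_some]
        rw [show pvTruthy none = false from rfl]
        simp only [Bool.false_eq_true, if_false]
        exact ih none (Or.inl rfl) hex' hrest
      · simp only [Option.elim_none, Option.elim_some]
        rw [show pvTruthy (some "") = false from rfl]
        simp only [Bool.false_eq_true, if_false]
        exact ih (some "") (Or.inr rfl) hex' hrest
    · rw [hk]
      simpa [Option.elim_none, Option.elim_some, pvTruthy] using pvModel_pres lines ks hrest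

-- ----- D_ in terms of pvVal -----

theorem pvD_iff (cpuinfo : String) :
    D_parse_cpuinfo_text cpuinfo ↔
      (let vs := (["model name", "hardware", "system type", "cpu model"].map
          (pvVal (PySem.Str.splitlines cpuinfo)))
       (∃ v ∈ vs, v ≠ none) ∧ (∀ v ∈ vs, v = none ∨ v = some "")) := by
  unfold D_parse_cpuinfo_text
  simp only []
  constructor
  · rintro ⟨⟨k, hk, hsome⟩, hall⟩
    constructor
    · refine ⟨pvVal (PySem.Str.splitlines cpuinfo) k, List.mem_map_of_mem hk, ?_⟩
      unfold pvVal
      cases h : (PySem.Str.splitlines cpuinfo).find? (pvKeyLine k) with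
      | none => rw [h] at hsome; simp at hsome
      | some ln => simp
    · intro v hv
      obtain ⟨k, hk, rfl⟩ := List.mem_map.mp hv
      have := hall k hk
      unfold pvVal
      cases h : (PySem.Str.splitlines cpuinfo).find? (pvKeyLine k) with
      | none => simp
      | some ln =>
        rw [h] at this
        simp only [Option.all_some] at this
        right
        have hcolon : PySem.Str.isIn ":" ln = true := by
          have hkl := List.find?_some h
          rw [pvKeyLine_eq] at hkl
          exact (Bool.and_eq_true_iff.mp hkl).2
        simp only [Option.map_some, Option.some.injEq]
        exact (pvColonVal_empty ln hcolon).mpr this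
  · rintro ⟨⟨v, hv, hnv⟩, hall⟩
    constructor
    · obtain ⟨k, hk, rfl⟩ := List.mem_map.mp hv
      refine ⟨k, hk, ?_⟩
      unfold pvVal at hnv
      cases h : (PySem.Str.splitlines cpuinfo).find? (pvKeyLine k) with
      | none => rw [h] at hnv; simp at hnv
      | some ln => simp [h]
    · intro k hk
      have := hall (pvVal (PySem.Str.splitlines cpuinfo) k) (List.mem_map_of_mem hk)
      unfold pvVal at this
      cases h : (PySem.Str.splitlines cpuinfo).find? (pvKeyLine k) with
      | none => simp
      | some ln =>
        rw [h] at this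
        simp only [Option.map_some] at this
        rcases this with h' | h'
        · simp at h'
        · simp only [Option.some.injEq] at h'
          have hcolon : PySem.Str.isIn ":" ln = true := by
            have hkl := List.find?_some h
            rw [pvKeyLine_eq] at hkl
            exact (Bool.and_eq_true_iff.mp hkl).2
          simp only [Option.all_some]
          exact (pvColonVal_empty ln hcolon).mp h'

-- ----- evaluating both whole programs to the same three-entry shape -----

theorem pvDict3 (c m f : Option String) :
    (PySem.Dict.insert (PySem.Dict.insert (PySem.Dict.insert
        (PySem.Dict.ofList [("model", none), ("cores", none), ("features", none)])
        "cores" c) "model" m) "features" f).items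
      = [("model", m), ("cores", c), ("features", f)] := by
  rfl

theorem pvA_eval (cpuinfo : String) :
    parse_cpuinfo_text cpuinfo =
      [("model", pvModelLoopA (PySem.Str.splitlines cpuinfo)
          ["model name", "hardware", "system type", "cpu model"] none),
       ("cores", if pvCountCores (PySem.Str.splitlines cpuinfo) 0 == 0 then none
                 else some (PySem.Int.toStr (pvCountCores (PySem.Str.splitlines cpuinfo) 0))),
       ("features", pvFirstMatchA "features" (PySem.Str.splitlines cpuinfo) none)] := by
  by_cases h : cpuinfo = ""
  · subst h; rfl
  · have hne : (cpuinfo == "") = false := by simpa using h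
    simp only [parse_cpuinfo_text, hne, Bool.false_eq_true, if_false]
    rw [pvDict3]

theorem pvB_eval (cpuinfo : String) :
    parse_cpuinfo_text_alt cpuinfo =
      [("model", pvResolveB (["model name", "hardware", "system type", "cpu model"].map
          (pvVal (PySem.Str.splitlines cpuinfo)))),
       ("cores", if pvCountCores (PySem.Str.splitlines cpuinfo) 0 == 0 then none
                 else some (PySem.Int.toStr (pvCountCores (PySem.Str.splitlines cpuinfo) 0))),
       ("features", pvFirstMatchA "features" (PySem.Str.splitlines cpuinfo) none)] := by
  simp only [parse_cpuinfo_text_alt, pvScanB_cores, pvScanB_mn, pvScanB_ha, pvScanB_st,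
    pvScanB_cm, pvScanB_fe, Option.elim, List.map, pvFirstMatchA_val]

-- ===== VERDICT =====
theorem parse_cpuinfo_text_spec : Claim_unchanged_parse_cpuinfo_text := by
  intro cpuinfo _
  unfold Spec_parse_cpuinfo_text
  intro hnd
  rw [pvA_eval, pvB_eval]
  set lines := PySem.Str.splitlines cpuinfo with hl
  set vs := (["model name", "hardware", "system type", "cpu model"].map (pvVal lines)) with hvs
  by_cases htr : ∃ v ∈ vs, pvTruthy v = true
  · rw [pvModel_truthy lines _ none (Or.inl rfl) htr]
  · have hall : ∀ v ∈ vs, v = none ∨ v = some "" := by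
      intro v hv
      cases v with
      | none => exact Or.inl rfl
      | some s =>
        by_cases hs : s = ""
        · exact Or.inr (by rw [hs])
        · exact absurd ⟨some s, hv, by simp [pvTruthy, hs]⟩ htr
    have hnone : ∀ v ∈ vs, v = none := by
      by_contra hc
      push Not at hc
      exact hnd ((pvD_iff cpuinfo).mpr ⟨hc, hall⟩)
    rw [pvModel_allnone lines _ none hnone, pvResolve_none vs hall]

theorem parse_cpuinfo_text_changed : Claim_changed_parse_cpuinfo_text := by
  unfold Claim_changed_parse_cpuinfo_text; decide

theorem parse_cpuinfo_text_tight : Claim_exact_parse_cpuinfo_text := by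
  intro cpuinfo _ hd heq
  obtain ⟨hex, hall⟩ := (pvD_iff cpuinfo).mp hd
  rw [pvA_eval, pvB_eval] at heq
  have h1 : pvModelLoopA (PySem.Str.splitlines cpuinfo)
      ["model name", "hardware", "system type", "cpu model"] none = some "" :=
    pvModel_empty _ _ none (Or.inl rfl) hex hall
  have h2 : pvResolveB (["model name", "hardware", "system type", "cpu model"].map
      (pvVal (PySem.Str.splitlines cpuinfo))) = none :=
    pvResolve_none _ hall
  rw [h1, h2] at heq
  simp at heq
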